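-- pv_equiv track=rewrite | github.com/0Frett/Text2DistBench | lib/eval_utils.py | _strip_percent_suffix_numbers
-- ===== SOURCE A (Python) =====
-- def _strip_percent_suffix_numbers(s: str) -> str:
--     """
--     Remove % that immediately follows a number when OUTSIDE of strings.
--     Examples: 83% -> 83,  100 % -> 100.  Leaves "100%" (inside quotes) unchanged.
--     """
--     out = []
--     i, n = 0, len(s)
--     in_str = False
--     escape = False
--
--     def is_digit_or_space(c: str) -> bool:
--         return c.isdigit() or c.isspace()
--
--     while i < n:
--         ch = s[i]
--         if not in_str:
--             if ch == '"':
--                 in_str = True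
--                 out.append(ch)
--                 i += 1
--                 continue
--             if ch == '%':
--                 # look back to see if previous non-space is a digit
--                 j = len(out) - 1
--                 while j >= 0 and out[j].isspace():
--                     j -= 1
--                 if j >= 0 and out[j].isdigit():
--                     # drop this percent sign
--                     i += 1
--                     continue
--             out.append(ch)
--             i += 1
--             continue
--
--         # inside string:
--         if escape:
--             out.append(ch)
--             escape = False
--             i += 1
--             continue
--         if ch == '\\':
--             out.append(ch)
--             escape = True
--             i += 1
--             continue
--         if ch == '"':
--             in_str = False
--             out.append(ch)
--             i += 1
--             continue
--
--         out.append(ch)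
--         i += 1
--
--     return "".join(out)
-- ===== SOURCE B (Python) =====
-- def _strip_percent_suffix_numbers(s: str) -> str:
--     # One forward pass: track the last non-space character emitted so far,
--     # so no backward scan over the output is ever needed.
--     out = []
--     last = ""          # last non-space char appended to out ("" if none yet)
--     in_str = False
--     escape = False
--     for ch in s:
--         if in_str:
--             if escape:
--                 escape = False
--             elif ch == '\\':
--                 escape = True
--             elif ch == '"':
--                 in_str = False
--         else:
--             if ch == '"':
--                 in_str = True
--             elif ch == '%' and last.isdigit():
--                 continue  # drop % that directly follows a number
--         out.append(ch)
--         if not ch.isspace():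
--             last = ch
--     return "".join(out)
-- ===== Notes on version B (the rewrite author's own statement) =====
-- stated objective: alternative
-- what changed: B tracks the last non-space character emitted in a single forward pass instead of A's backward scan over the accumulated output at every percent sign.
import Mathlib
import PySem

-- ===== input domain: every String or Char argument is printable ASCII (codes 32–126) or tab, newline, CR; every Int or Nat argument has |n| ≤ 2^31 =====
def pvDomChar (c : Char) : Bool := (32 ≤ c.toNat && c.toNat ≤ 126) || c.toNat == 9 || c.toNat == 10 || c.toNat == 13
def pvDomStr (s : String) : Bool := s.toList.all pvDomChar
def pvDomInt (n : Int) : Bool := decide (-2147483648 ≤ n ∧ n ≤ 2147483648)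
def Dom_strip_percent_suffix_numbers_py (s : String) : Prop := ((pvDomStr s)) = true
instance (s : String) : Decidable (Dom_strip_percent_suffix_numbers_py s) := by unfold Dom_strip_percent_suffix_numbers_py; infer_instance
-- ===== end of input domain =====

-- B replaces A's backward scan over the output at each percent sign with an incrementally
-- tracked last non-space output character: one forward pass (alternative decomposition).


-- ===== PORT A =====
-- A's inner while loop: walk back from the end of out, skipping spaces; digit check.
-- (out is kept reversed, so walking back from the end = walking the list front.)
def pvBackDigit : List Char → Bool
  | [] => false
  | c :: rest => if PySem.Chars.isspace c then pvBackDigit rest else PySem.Chars.isdigit c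

def pvStripA : List Char → List Char → Bool → Bool → List Char
  | [], out, _, _ => out.reverse
  | ch :: rest, out, in_str, escape =>
    if !in_str then
      if ch = '"' then pvStripA rest (ch :: out) true escape
      else if ch = '%' then
        if pvBackDigit out then pvStripA rest out in_str escape
        else pvStripA rest (ch :: out) in_str escape
      else pvStripA rest (ch :: out) in_str escape
    else if escape then pvStripA rest (ch :: out) in_str false
    else if ch = '\\' then pvStripA rest (ch :: out) in_str true
    else if ch = '"' then pvStripA rest (ch :: out) false escape
    else pvStripA rest (ch :: out) in_str escape

def strip_percent_suffix_numbers_py (s : String) : String :=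
  String.ofList (pvStripA s.toList [] false false)

-- ===== PORT B =====
-- state: (reversed output, last non-space emitted char, in_str, escape)
def pvEmitB (out : List Char) (last : Option Char) (ch : Char) : List Char × Option Char :=
  (ch :: out, if PySem.Chars.isspace ch then last else some ch)

def pvLastDigit : Option Char → Bool
  | none => false
  | some c => PySem.Chars.isdigit c

def pvStepB : List Char × Option Char × Bool × Bool → Char → List Char × Option Char × Bool × Bool
  | (out, last, in_str, escape), ch =>
    if in_str then
      if escape then ((pvEmitB out last ch).1, (pvEmitB out last ch).2, true, false)
      else if ch = '\\' then ((pvEmitB out last ch).1, (pvEmitB out last ch).2, true, true)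
      else if ch = '"' then ((pvEmitB out last ch).1, (pvEmitB out last ch).2, false, escape)
      else ((pvEmitB out last ch).1, (pvEmitB out last ch).2, true, escape)
    else
      if ch = '"' then ((pvEmitB out last ch).1, (pvEmitB out last ch).2, true, escape)
      else if ch = '%' && pvLastDigit last then (out, last, in_str, escape)
      else ((pvEmitB out last ch).1, (pvEmitB out last ch).2, in_str, escape)

def strip_percent_suffix_numbers_py_alt (s : String) : String :=
  String.ofList (s.toList.foldl pvStepB ([], none, false, false)).1.reverse

-- ===== PRECONDITION & SPEC =====
def Spec_strip_percent_suffix_numbers_py (s : String) (out : String) : Prop := out = strip_percent_suffix_numbers_py_alt s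
instance (s : String) (out : String) : Decidable (Spec_strip_percent_suffix_numbers_py s out) := by unfold Spec_strip_percent_suffix_numbers_py; infer_instance

-- ===== CLAIM (what is proved, stated in full; the proofs are below) =====
def Claim_equal_strip_percent_suffix_numbers_py : Prop := ∀ (s : String), Dom_strip_percent_suffix_numbers_py s → Spec_strip_percent_suffix_numbers_py s (strip_percent_suffix_numbers_py s)

-- ===== LEMMAS AND PROOFS =====

-- A's backscan computes exactly "is the head of out-with-spaces-dropped a digit".
theorem pvBackDigit_eq (out : List Char) :
    pvBackDigit out = pvLastDigit (out.dropWhile PySem.Chars.isspace).head? := by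
  induction out with
  | nil => rfl
  | cons c rest ih =>
    by_cases hs : PySem.Chars.isspace c = true <;>
      simp [pvBackDigit, List.dropWhile_cons, hs, ih, pvLastDigit]

-- Emitting ch preserves the "last = head of out with spaces dropped" invariant.
theorem pvEmitB_inv (out : List Char) (last : Option Char) (ch : Char)
    (h : last = (out.dropWhile PySem.Chars.isspace).head?) :
    (pvEmitB out last ch).2 = (((pvEmitB out last ch).1).dropWhile PySem.Chars.isspace).head? := by
  by_cases hs : PySem.Chars.isspace ch = true <;>
    simp [pvEmitB, List.dropWhile_cons, hs, h]

theorem pvStrip_main (l : List Char) : ∀ (out : List Char) (last : Option Char)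
    (in_str escape : Bool), last = (out.dropWhile PySem.Chars.isspace).head? →
    pvStripA l out in_str escape = (List.foldl pvStepB (out, last, in_str, escape) l).1.reverse := by
  induction l with
  | nil => intro out last in_str escape _; simp [pvStripA]
  | cons ch rest ih =>
    intro out last in_str escape h
    have hemit := pvEmitB_inv out last ch h
    cases in_str with
    | false =>
      by_cases h1 : ch = '"'
      · subst h1
        simp only [pvStripA, pvStepB, Bool.not_false, if_pos, List.foldl_cons, if_true]
        exact ih _ _ true escape hemit
      · by_cases h2 : ch = '%'
        · subst h2
          by_cases h3 : pvBackDigit out = true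
          · have h3' : pvLastDigit last = true := by rw [h, ← pvBackDigit_eq]; exact h3
            simp only [pvStripA, pvStepB, h1, Bool.not_false, if_true, if_neg, h3,
              List.foldl_cons, h3', Bool.and_true, ite_true, if_pos]
            exact ih out last false escape h
          · have h3' : pvLastDigit last = false := by rw [h, ← pvBackDigit_eq]; simpa using h3
            simp only [pvStripA, pvStepB, h1, Bool.not_false, if_true, if_neg, h3,
              List.foldl_cons, h3', Bool.and_false, Bool.false_eq_true, if_false, if_pos]
            exact ih _ _ false escape hemit
        · simp only [pvStripA, pvStepB, Bool.not_false, if_true, if_neg h1, if_neg h2,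
            List.foldl_cons]
          have hb : (ch = '%' && pvLastDigit last) = false := by simp [h2]
          simp only [hb, Bool.false_eq_true, if_false]
          exact ih _ _ false escape hemit
    | true =>
      cases escape with
      | true =>
        simp only [pvStripA, pvStepB, Bool.not_true, Bool.false_eq_true, if_false, if_true,
          List.foldl_cons]
        exact ih _ _ true false hemit
      | false =>
        by_cases h1 : ch = '\\'
        · subst h1
          simp only [pvStripA, pvStepB, Bool.not_true, Bool.false_eq_true, if_false, if_pos,
            List.foldl_cons]
          exact ih _ _ true true hemit
        · by_cases h2 : ch = '"'
          · subst h2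
            simp only [pvStripA, pvStepB, Bool.not_true, Bool.false_eq_true, if_false, if_neg h1,
              if_pos, List.foldl_cons]
            exact ih _ _ false false hemit
          · simp only [pvStripA, pvStepB, Bool.not_true, Bool.false_eq_true, if_false, if_neg h1,
              if_neg h2, List.foldl_cons]
            exact ih _ _ true false hemit

-- ===== VERDICT (by name: the statement is the Claim_ definition above) =====
theorem strip_percent_suffix_numbers_py_spec : Claim_equal_strip_percent_suffix_numbers_py := by
  intro s _
  unfold Spec_strip_percent_suffix_numbers_py strip_percent_suffix_numbers_py
    strip_percent_suffix_numbers_py_alt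
  rw [pvStrip_main s.toList [] none false false (by simp)]
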